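-- pv_equiv track=rewrite | github.com/rjovelin/HumanNestedGenes | HsaNestedGenes.py | CountDiseaseGenes
-- ===== SOURCE A (Python) =====
-- def CountDiseaseGenes(GeneList, DiseaseList):
--     '''
--     (list, list) -> list
--     Take a list of gene sets and a list of sets of disease genes and return
--     a list with lists of disease and non-disease gene counts for each category
--     for each disease class
--     '''
--
--     GeneCounts = []
--     for DiseaseType in DiseaseList:
--         counts = []
--         for i in range(len(GeneList)):
--             disease = len([gene for gene in GeneList[i] if gene in DiseaseType])
--             nondisease = len([gene for gene in GeneList[i] if gene not in DiseaseType])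
--             counts.append([disease, nondisease])
--         GeneCounts.append(counts)
--     return GeneCounts
-- ===== SOURCE B (Python) =====
-- def CountDiseaseGenes(GeneList, DiseaseList):
--     '''Precompute a frequency table per category once; for each disease class,
--     sum the frequencies of its distinct genes instead of rescanning the category.'''
--     freqs = []
--     for genes in GeneList:
--         f = {}
--         for g in genes:
--             f[g] = f.get(g, 0) + 1
--         freqs.append((f, len(genes)))
--     GeneCounts = []
--     for DiseaseType in DiseaseList:
--         distinct = list(dict.fromkeys(DiseaseType))
--         counts = []
--         for f, total in freqs:
--             disease = sum(f.get(g, 0) for g in distinct)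
--             counts.append([disease, total - disease])
--         GeneCounts.append(counts)
--     return GeneCounts
-- ===== Notes on version B (the rewrite author's own statement) =====
-- stated objective: alternative
-- what changed: B precomputes a gene->frequency dictionary per category once and, for each disease class, sums the frequencies of the class's distinct genes, so the disease loop looks up disease genes in the tables instead of rescanning each gene list twice with linear list membership.
import Mathlib
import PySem

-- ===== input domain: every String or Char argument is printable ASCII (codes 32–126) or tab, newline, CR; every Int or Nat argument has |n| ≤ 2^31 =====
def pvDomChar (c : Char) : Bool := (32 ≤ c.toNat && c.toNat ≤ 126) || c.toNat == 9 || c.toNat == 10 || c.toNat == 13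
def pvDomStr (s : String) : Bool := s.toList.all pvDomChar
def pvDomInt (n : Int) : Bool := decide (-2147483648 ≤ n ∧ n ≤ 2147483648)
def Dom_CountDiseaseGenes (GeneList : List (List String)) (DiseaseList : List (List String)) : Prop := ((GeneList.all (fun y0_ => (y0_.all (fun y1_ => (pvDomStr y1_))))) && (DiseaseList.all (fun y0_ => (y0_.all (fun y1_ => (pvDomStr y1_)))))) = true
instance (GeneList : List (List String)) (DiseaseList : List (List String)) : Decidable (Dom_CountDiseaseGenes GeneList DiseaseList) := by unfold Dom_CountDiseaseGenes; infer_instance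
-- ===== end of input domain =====

-- B precomputes per-category frequency dictionaries once and sums frequencies of each disease class's distinct genes, never rescanning the gene lists in the disease loop.

-- ===== PORT A =====
def CountDiseaseGenes (GeneList : List (List String)) (DiseaseList : List (List String)) : List (List (List Int)) :=
  DiseaseList.foldl (fun GeneCounts DiseaseType =>
    GeneCounts ++ [(PySem.List.pyRange 0 (GeneList.length : Int) 1).foldl (fun counts i =>
      let gl := PySem.List.pyGetD GeneList i []
      let disease : Int := (gl.filter (fun gene => DiseaseType.contains gene)).length
      let nondisease : Int := (gl.filter (fun gene => !DiseaseType.contains gene)).length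
      counts ++ [[disease, nondisease]]) []]) []

-- ===== PORT B =====
def CountDiseaseGenes_alt (GeneList : List (List String)) (DiseaseList : List (List String)) : List (List (List Int)) :=
  let freqs : List (PySem.Dict String Int × Int) :=
    GeneList.foldl (fun freqs genes =>
      let f := genes.foldl (fun f g => f.insert g (f.getD g 0 + 1)) PySem.Dict.empty
      freqs ++ [(f, (genes.length : Int))]) []
  DiseaseList.foldl (fun GeneCounts DiseaseType =>
    let distinct := PySem.List.dedup DiseaseType
    GeneCounts ++ [freqs.foldl (fun counts ft =>
      let disease : Int := (distinct.map (fun g => ft.1.getD g 0)).sum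
      counts ++ [[disease, ft.2 - disease]]) []]) []

-- ===== PRECONDITION & SPEC =====
def Spec_CountDiseaseGenes (GeneList : List (List String)) (DiseaseList : List (List String)) (out : List (List (List Int))) : Prop := out = CountDiseaseGenes_alt GeneList DiseaseList
instance (GeneList : List (List String)) (DiseaseList : List (List String)) (out : List (List (List Int))) : Decidable (Spec_CountDiseaseGenes GeneList DiseaseList out) := by unfold Spec_CountDiseaseGenes; infer_instance

-- ===== CLAIM =====
def Claim_equal_CountDiseaseGenes : Prop := ∀ (GeneList : List (List String)) (DiseaseList : List (List String)), Dom_CountDiseaseGenes GeneList DiseaseList → Spec_CountDiseaseGenes GeneList DiseaseList (CountDiseaseGenes GeneList DiseaseList)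

-- ===== LEMMAS AND PROOFS =====

-- folding 'acc ++ [f x]' is map
theorem pv_foldl_push {α β : Type} (f : α → β) : ∀ (l : List α) (init : List β),
    l.foldl (fun acc x => acc ++ [f x]) init = init ++ l.map f := by
  intro l
  induction l with
  | nil => simp
  | cons x xs ih => intro init; simp [List.foldl_cons, ih]

-- the negated filter length is the complement count
theorem pv_filter_not_length (p : String → Bool) (genes : List String) :
    ((genes.filter (fun g => !p g)).length : Int)
      = (genes.length : Int) - ((genes.filter p).length : Int) := by
  induction genes with
  | nil => simp
  | cons g gs ih =>
    by_cases h : p g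
    · simp [h, ih]
    · simp [h, ih]
      ring

-- indexing map over range(len(xs)) is a map over xs
theorem pv_map_index {a b : Type} (xs : List a) (d : a) (f : a -> b) :
    (PySem.List.pyRange 0 (xs.length : Int) 1).map (fun i => f (PySem.List.pyGetD xs i d)) = xs.map f := by
  calc (PySem.List.pyRange 0 (xs.length : Int) 1).map (fun i => f (PySem.List.pyGetD xs i d))
      = ((PySem.List.pyRange 0 (xs.length : Int) 1).map (fun i => PySem.List.pyGetD xs i d)).map f := by
        rw [List.map_map]; rfl
    _ = xs.map f := by rw [PySem.List.map_pyGetD_pyRange_zero']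

-- summing an equality indicator over a duplicate-free list
theorem pv_sum_indicator (x : String) : ∀ (ds : List String), ds.Nodup →
    ((ds.map (fun g => if x = g then (1 : Int) else 0)).sum)
      = if ds.contains x then 1 else 0 := by
  intro ds
  induction ds with
  | nil => simp
  | cons d ds ih =>
    intro hnd
    have hd : d ∉ ds := (List.nodup_cons.mp hnd).1
    have hds := (List.nodup_cons.mp hnd).2
    by_cases h : x = d
    · subst h
      have hc : ds.contains x = false := by
        simp [List.contains_eq_mem]; exact hd
      simp [ih hds, hd]
    · simp [h, ih hds, List.contains_eq_mem]

-- summing occurrence counts over a duplicate-free list equals the filtered length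
theorem pv_sum_count (ds : List String) (hnd : ds.Nodup) : ∀ (genes : List String),
    ((ds.map (fun g => (genes.count g : Int))).sum)
      = ((genes.filter (fun x => ds.contains x)).length : Int) := by
  intro genes
  induction genes with
  | nil => simp
  | cons x gs ih =>
    have hcnt : ∀ g : String, ((x :: gs).count g : Int)
        = (gs.count g : Int) + (if g = x then (1 : Int) else 0) := by
      intro g
      by_cases h : g = x
      · subst h; simp
      · simp [h, Ne.symm h]
    have hsplit :
        (ds.map (fun g => ((x :: gs).count g : Int))).sum
          = (ds.map (fun g => (gs.count g : Int))).sum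
            + (ds.map (fun g => if g = x then (1 : Int) else 0)).sum := by
      simp only [hcnt]
      rw [← List.sum_map_add]
    rw [hsplit, ih]
    have hind := pv_sum_indicator x ds hnd
    simp only [eq_comm (a := x)] at hind
    rw [hind]
    by_cases h : x ∈ ds <;>
      simp [List.contains_eq_mem, h]

-- frequency-table lookup is the occurrence count
theorem pv_freq_getD (genes : List String) (g : String) :
    (genes.foldl (fun f g => f.insert g (f.getD g 0 + 1)) PySem.Dict.empty).getD g 0
      = (genes.count g : Int) := by
  rw [PySem.Dict.getD_foldl_insert_add_one]
  simp

-- B's summed frequencies equal A's disease filter count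
theorem pv_disease_eq (dt genes : List String) :
    (((PySem.List.dedup dt).map
        (fun g => (genes.foldl (fun f g => f.insert g (f.getD g 0 + 1)) PySem.Dict.empty).getD g 0)).sum)
      = ((genes.filter (fun x => dt.contains x)).length : Int) := by
  have h1 : ((PySem.List.dedup dt).map
      (fun g => (genes.foldl (fun f g => f.insert g (f.getD g 0 + 1)) PySem.Dict.empty).getD g 0))
      = ((PySem.List.dedup dt).map (fun g => (genes.count g : Int))) := by
    exact List.map_congr_left (fun g _ => pv_freq_getD genes g)
  rw [h1, pv_sum_count (PySem.List.dedup dt) (PySem.List.nodup_dedup dt)]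
  congr 1
  refine congrArg _ (List.filter_congr fun x _ => ?_)
  simp [List.contains_eq_mem]

theorem pv_main (GeneList DiseaseList : List (List String)) :
    CountDiseaseGenes GeneList DiseaseList = CountDiseaseGenes_alt GeneList DiseaseList := by
  unfold CountDiseaseGenes CountDiseaseGenes_alt
  simp only [pv_foldl_push, List.nil_append, List.map_map]
  refine List.map_congr_left fun dt _ => ?_
  rw [pv_map_index GeneList []
    (fun gl => [((gl.filter (fun gene => dt.contains gene)).length : Int),
                ((gl.filter (fun gene => !dt.contains gene)).length : Int)])]
  refine List.map_congr_left fun genes _ => ?_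
  simp only [Function.comp]
  rw [pv_disease_eq dt genes, pv_filter_not_length]

-- ===== VERDICT =====
theorem CountDiseaseGenes_spec : Claim_equal_CountDiseaseGenes := by
  intro GeneList DiseaseList _
  exact pv_main GeneList DiseaseList
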